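-- pv_equiv track=rewrite | github.com/billyxs/notes.md | python/learning/python_morsels/2019-04-15_lstrip/lstrip.py | lstrip_2
-- ===== SOURCE A (Python) =====
-- def lstrip_2(iterable, strip_value):
--     """Return iterable with items removed from beginning"""
--     stripped = []
--     iterator = iter(iterable)
--     for item in iterator:
--         if not item == strip_value:
--             stripped.append(item)
--             break
--     for item in iterator:
--         stripped.append(item)
--     return stripped
-- ===== SOURCE B (Python) =====
-- def lstrip_2(iterable, strip_value):
--     """Return iterable with items removed from beginning"""
--     stripped = []
--     started = False
--     for item in iterable:
--         if started or item != strip_value: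
--             started = True
--             stripped.append(item)
--     return stripped
-- ===== Notes on version B (the rewrite author's own statement) =====
-- stated objective: simpler
-- what changed: Replaces A's split of the iterator into two loops (skip-then-break, then drain the rest) with one single pass over the iterable maintaining a boolean 'started' flag.
import Mathlib
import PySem

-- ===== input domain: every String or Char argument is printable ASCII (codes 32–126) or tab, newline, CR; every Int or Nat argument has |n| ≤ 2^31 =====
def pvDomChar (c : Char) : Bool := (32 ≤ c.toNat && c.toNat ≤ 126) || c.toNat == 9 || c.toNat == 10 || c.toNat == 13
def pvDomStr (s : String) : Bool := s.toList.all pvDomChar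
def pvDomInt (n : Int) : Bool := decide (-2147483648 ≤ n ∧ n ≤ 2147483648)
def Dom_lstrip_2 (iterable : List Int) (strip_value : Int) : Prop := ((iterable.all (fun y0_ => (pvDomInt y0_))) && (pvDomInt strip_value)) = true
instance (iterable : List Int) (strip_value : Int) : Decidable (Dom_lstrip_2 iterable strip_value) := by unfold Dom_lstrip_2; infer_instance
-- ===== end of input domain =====

-- B replaces A's two loops over a shared iterator (skip-then-break, then drain) with one
-- single pass carrying a boolean `started` flag; same O(n) cost, simpler decomposition.

-- ===== PORT A =====
-- first loop: consume items equal to strip_value; on the first other item, append it,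
-- break, and the second loop appends everything left on the shared iterator (x :: xs).
def lstrip_2 (iterable : List Int) (strip_value : Int) : List Int :=
  match iterable with
  | [] => []
  | x :: xs => if x == strip_value then lstrip_2 xs strip_value else x :: xs

-- ===== PORT B =====
-- single foldl over the list with state (started, stripped), mirroring Source B's one loop.
def lstrip_2_alt (iterable : List Int) (strip_value : Int) : List Int :=
  (iterable.foldl
    (fun (s : Bool × List Int) item =>
      if s.1 || item != strip_value then (true, s.2 ++ [item]) else s)
    (false, [])).2

-- ===== PRECONDITION & SPEC =====
def Spec_lstrip_2 (iterable : List Int) (strip_value : Int) (out : List Int) : Prop := out = lstrip_2_alt iterable strip_value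
instance (iterable : List Int) (strip_value : Int) (out : List Int) : Decidable (Spec_lstrip_2 iterable strip_value out) := by unfold Spec_lstrip_2; infer_instance

-- ===== CLAIM (what is proved, stated in full; the proofs are below) =====
def Claim_equal_lstrip_2 : Prop := ∀ (iterable : List Int) (strip_value : Int), Dom_lstrip_2 iterable strip_value → Spec_lstrip_2 iterable strip_value (lstrip_2 iterable strip_value)

-- ===== LEMMAS AND PROOFS =====

-- once started = true, B's fold just appends every remaining item
theorem lstrip_2_fold_started (xs : List Int) (sv : Int) (acc : List Int) :
    (xs.foldl
      (fun (s : Bool × List Int) item =>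
        if s.1 || item != sv then (true, s.2 ++ [item]) else s)
      (true, acc)) = (true, acc ++ xs) := by
  induction xs generalizing acc with
  | nil => simp [List.foldl]
  | cons x xs ih =>
    rw [List.foldl_cons,
      show (if (((true : Bool), acc).1 || x != sv) = true
            then ((true : Bool), ((true : Bool), acc).2 ++ [x]) else ((true : Bool), acc))
          = ((true : Bool), acc ++ [x]) from by simp,
      ih]
    simp

theorem lstrip_2_eq_alt (xs : List Int) (sv : Int) :
    lstrip_2 xs sv = lstrip_2_alt xs sv := by
  induction xs with
  | nil => rfl
  | cons x xs ih =>
    by_cases h : x = sv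
    · simpa [lstrip_2, lstrip_2_alt, List.foldl, h] using ih
    · rw [lstrip_2, lstrip_2_alt, if_neg (show ¬((x == sv) = true) by simp [h]), List.foldl_cons,
        show (if (((false : Bool), ([] : List Int)).1 || x != sv) = true
              then ((true : Bool), (((false : Bool), ([] : List Int))).2 ++ [x])
              else ((false : Bool), ([] : List Int)))
            = ((true : Bool), [x]) from by simp [h],
        lstrip_2_fold_started]
      rfl

-- ===== VERDICT (by name: the statement is the Claim_ definition above) =====
theorem lstrip_2_spec : Claim_equal_lstrip_2 := by
  intro iterable strip_value _
  exact lstrip_2_eq_alt iterable strip_value
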